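-- pv_equiv track=rewrite | github.com/lngquoctrung/machine-translation | src/evaluation/beam_search.py | _copy_through_names
-- ===== SOURCE A (Python) =====
-- def _copy_through_names(translated_text: str, proper_names: dict,
--                         input_words: list) -> str:
--     """
--     Copy-through mechanism
--     """
--     if not proper_names:
--         return translated_text
--
--     # Split và tìm <UNK>
--     output_words = translated_text.split()
--     sorted_names = [proper_names[pos] for pos in sorted(proper_names.keys())]
--     name_idx = 0
--     for i, word in enumerate(output_words):
--         if word == "<UNK>" and name_idx < len(sorted_names):
--             output_words[i] = sorted_names[name_idx]
--             name_idx += 1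
--
--     return " ".join(output_words)
-- ===== SOURCE B (Python) =====
-- def _copy_through_names(translated_text: str, proper_names: dict,
--                         input_words: list) -> str:
--     """Copy-through: split the word list at <UNK> separators, then interleave
--     the segments with the key-sorted names (padded with '<UNK>')."""
--     if not proper_names:
--         return translated_text
--     segments = []   # runs of words before each <UNK>
--     cur = []        # current run (trailing run at the end)
--     for w in translated_text.split():
--         if w == "<UNK>":
--             segments.append(cur)
--             cur = []
--         else:
--             cur.append(w)
--     names = [proper_names[k] for k in sorted(proper_names)]
--     fills = (names + ["<UNK>"] * len(segments))[:len(segments)]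
--     out = []
--     for fill, seg in zip(fills, segments):
--         out.extend(seg)
--         out.append(fill)
--     out.extend(cur)
--     return " ".join(out)
-- ===== Notes on version B (the rewrite author's own statement) =====
-- stated objective: alternative
-- what changed: B never updates the word list: it splits the word sequence into the runs between <UNK> separators, pads the key-sorted names with '<UNK>' to the number of separators, and rebuilds the sentence by interleaving runs with fills, instead of A's in-place assignment loop with a running name counter.
import Mathlib
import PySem

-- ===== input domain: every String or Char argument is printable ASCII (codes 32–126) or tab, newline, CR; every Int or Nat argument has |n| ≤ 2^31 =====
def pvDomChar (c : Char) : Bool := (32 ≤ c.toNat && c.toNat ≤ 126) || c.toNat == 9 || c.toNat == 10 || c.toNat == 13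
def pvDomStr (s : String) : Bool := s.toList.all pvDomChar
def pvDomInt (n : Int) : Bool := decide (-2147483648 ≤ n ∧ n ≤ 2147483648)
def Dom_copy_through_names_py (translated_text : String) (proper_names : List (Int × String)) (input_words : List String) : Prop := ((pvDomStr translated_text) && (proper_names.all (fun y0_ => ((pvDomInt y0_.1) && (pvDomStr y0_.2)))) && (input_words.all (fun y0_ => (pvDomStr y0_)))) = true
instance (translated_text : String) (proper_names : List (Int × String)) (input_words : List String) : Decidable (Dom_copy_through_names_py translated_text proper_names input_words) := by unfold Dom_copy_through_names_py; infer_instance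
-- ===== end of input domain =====

-- B never mutates the word list: it splits the word sequence into the runs between <UNK>
-- separators and interleaves them with the padded, key-sorted names (alternative, same cost).

-- ===== PORT A =====
-- literal port of A: fold over enumerate(output_words) carrying (list, name_idx);
-- dict subscript proper_names[pos] is exact here (pos ranges over the dict's keys).
def copy_through_names_py (translated_text : String) (proper_names : List (Int × String)) (input_words : List String) : String :=
  if proper_names = [] then translated_text
  else
    let d := PySem.Dict.ofList proper_names
    let output_words := PySem.Str.split₀ translated_text
    let sorted_names := (PySem.List.sorted d.keys (fun x => x) false).map (fun pos => d.getD pos "")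
    let r := (PySem.List.enumerate output_words 0).foldl
      (fun (s : List String × Nat) p =>
        if p.2 = "<UNK>" ∧ s.2 < sorted_names.length then
          (PySem.List.pySetD s.1 p.1 (sorted_names.getD s.2 ""), s.2 + 1)
        else s)
      (output_words, 0)
    PySem.Str.join " " r.1

-- ===== PORT B =====
def copy_through_names_py_alt (translated_text : String) (proper_names : List (Int × String)) (input_words : List String) : String :=
  if proper_names = [] then translated_text
  else
    let d := PySem.Dict.ofList proper_names
    -- for w in words: split into runs (segments) between "<UNK>" separators, trailing run cur
    let p := (PySem.Str.split₀ translated_text).foldl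
      (fun (s : List (List String) × List String) w =>
        if w = "<UNK>" then (s.1 ++ [s.2], []) else (s.1, s.2 ++ [w]))
      ([], [])
    let segments := p.1
    let cur := p.2
    let names := (PySem.List.sorted d.keys (fun x => x) false).map (fun k => d.getD k "")
    let fills := (names ++ List.replicate segments.length "<UNK>").take segments.length
    -- for fill, seg in zip(fills, segments): out.extend(seg); out.append(fill)
    let out := (fills.zip segments).foldl (fun acc fs => acc ++ fs.2 ++ [fs.1]) []
    PySem.Str.join " " (out ++ cur)

-- ===== PRECONDITION & SPEC =====
def Spec_copy_through_names_py (translated_text : String) (proper_names : List (Int × String)) (input_words : List String) (out : String) : Prop := out = copy_through_names_py_alt translated_text proper_names input_words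
instance (translated_text : String) (proper_names : List (Int × String)) (input_words : List String) (out : String) : Decidable (Spec_copy_through_names_py translated_text proper_names input_words out) := by unfold Spec_copy_through_names_py; infer_instance

-- ===== CLAIM (what is proved, stated in full; the proofs are below) =====
def Claim_equal_copy_through_names_py : Prop := ∀ (translated_text : String) (proper_names : List (Int × String)) (input_words : List String), Dom_copy_through_names_py translated_text proper_names input_words → Spec_copy_through_names_py translated_text proper_names input_words (copy_through_names_py translated_text proper_names input_words)

-- ===== LEMMAS AND PROOFS =====

-- reference recursion: replace each "<UNK>" by the next remaining name
def pvGo : List String → List String → List String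
  | [], _ => []
  | w :: ws, names =>
    if w = "<UNK>" then
      match names with
      | [] => w :: pvGo ws []
      | n :: ns => n :: pvGo ws ns
    else w :: pvGo ws names

-- front-recursion form of B's segmentation fold
def pvSplitU : List String → List (List String) × List String
  | [] => ([], [])
  | w :: ws =>
    let p := pvSplitU ws
    if w = "<UNK>" then ([] :: p.1, p.2)
    else
      match p.1 with
      | [] => ([], w :: p.2)
      | s :: ss => ((w :: s) :: ss, p.2)

theorem pvSegFold_eq (ws : List String) : ∀ (A : List (List String)) (c : List String),
    ws.foldl (fun (s : List (List String) × List String) w =>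
        if w = "<UNK>" then (s.1 ++ [s.2], []) else (s.1, s.2 ++ [w])) (A, c)
    = (A ++ (match (pvSplitU ws).1 with
             | [] => ([], c ++ (pvSplitU ws).2)
             | s :: ss => ((c ++ s) :: ss, (pvSplitU ws).2) : List (List String) × List String).1,
       (match (pvSplitU ws).1 with
        | [] => (([] : List (List String)), c ++ (pvSplitU ws).2)
        | s :: ss => ((c ++ s) :: ss, (pvSplitU ws).2) : List (List String) × List String).2) := by
  induction ws with
  | nil => intro A c; simp [pvSplitU]
  | cons w ws ih =>
    intro A c
    by_cases hw : w = "<UNK>"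
    · subst hw
      simp only [List.foldl_cons, if_pos rfl, ih, pvSplitU]
      cases h : (pvSplitU ws).1 <;> simp
    · simp only [List.foldl_cons, if_neg hw, ih, pvSplitU]
      cases h : (pvSplitU ws).1 <;> simp [hw]

-- the fold as B runs it, with both accumulators empty
theorem pvSegFold_nil (ws : List String) :
    ws.foldl (fun (s : List (List String) × List String) w =>
        if w = "<UNK>" then (s.1 ++ [s.2], []) else (s.1, s.2 ++ [w])) ([], [])
    = pvSplitU ws := by
  rw [pvSegFold_eq]
  rcases hp : pvSplitU ws with ⟨s1, s2⟩
  simp only [hp]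
  cases s1 <;> simp

theorem pvTake_append_replicate (x : String) : ∀ (l : List String) (k j : Nat),
    (l ++ List.replicate (k + j) x).take k = (l ++ List.replicate k x).take k := by
  intro l
  induction l with
  | nil =>
    intro k j
    rw [List.nil_append, List.nil_append, List.take_replicate, List.take_replicate,
      Nat.min_self, Nat.min_eq_left (Nat.le_add_right k j)]
  | cons a l ih =>
    intro k j
    cases k with
    | zero => simp
    | succ k =>
      simp only [List.cons_append, List.take_succ_cons]
      have h1 : List.take k (l ++ List.replicate (k + 1 + j) x)
          = List.take k (l ++ List.replicate k x) := by
        rw [show k + 1 + j = k + (1 + j) from by omega]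
        exact ih k (1 + j)
      rw [h1, ih k 1]

theorem pvFoldl_out (l : List (String × List String)) : ∀ (acc : List String),
    l.foldl (fun acc fs => acc ++ fs.2 ++ [fs.1]) acc
    = acc ++ l.flatMap (fun fs => fs.2 ++ [fs.1]) := by
  induction l with
  | nil => intro acc; simp
  | cons p l ih => intro acc; simp [ih, List.append_assoc, List.flatMap_def]

-- B's interleaving of the segmentation equals the reference recursion
theorem pvInterleave_eq (ws : List String) : ∀ (names : List String),
    (((names ++ List.replicate (pvSplitU ws).1.length "<UNK>").take (pvSplitU ws).1.length).zip
        (pvSplitU ws).1).flatMap (fun fs => fs.2 ++ [fs.1]) ++ (pvSplitU ws).2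
    = pvGo ws names := by
  induction ws with
  | nil => intro names; simp [pvSplitU, pvGo]
  | cons w ws ih =>
    intro names
    by_cases hw : w = "<UNK>"
    · subst hw
      have hsp : pvSplitU ("<UNK>" :: ws) = ([] :: (pvSplitU ws).1, (pvSplitU ws).2) := by
        simp [pvSplitU]
      rw [hsp]
      cases names with
      | nil =>
        have h0 := ih []
        simp only [List.nil_append, List.take_replicate, Nat.min_self] at h0
        simp [pvGo, List.take_replicate, List.replicate_succ, h0]
      | cons n ns =>
        simp only [pvGo, List.length_cons, List.cons_append, List.take_succ_cons,
          List.zip_cons_cons, List.flatMap_cons, List.nil_append, List.singleton_append,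
          if_pos rfl]
        rw [pvTake_append_replicate "<UNK>" ns (pvSplitU ws).1.length 1, ih ns]
        simp
    · have hgo : pvGo (w :: ws) names = w :: pvGo ws names := by simp [pvGo, hw]
      rw [hgo]
      cases h : (pvSplitU ws).1 with
      | nil =>
        have hsp : pvSplitU (w :: ws) = ([], w :: (pvSplitU ws).2) := by
          simp [pvSplitU, hw, h]
        rw [hsp]
        have h0 := ih names
        rw [h] at h0
        simp only [List.length_nil, List.take_zero, List.zip_nil_right, List.flatMap_nil,
          List.nil_append] at h0 ⊢
        rw [h0]
      | cons s ss =>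
        have hsp : pvSplitU (w :: ws) = ((w :: s) :: ss, (pvSplitU ws).2) := by
          simp [pvSplitU, hw, h]
        rw [hsp]
        have h0 := ih names
        rw [h] at h0
        obtain ⟨f, fs, hx⟩ : ∃ f fs,
            (names ++ List.replicate (ss.length + 1) "<UNK>").take (ss.length + 1)
              = f :: fs := by
          rcases hc : (names ++ List.replicate (ss.length + 1) "<UNK>").take (ss.length + 1)
            with _ | ⟨f, fs⟩
          · exfalso
            have hlen := congrArg List.length hc
            simp [List.length_take] at hlen
          · exact ⟨f, fs, rfl⟩
        simp only [List.length_cons] at hx h0 ⊢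
        rw [hx] at h0 ⊢
        simp only [List.zip_cons_cons, List.flatMap_cons, List.cons_append] at h0 ⊢
        rw [← h0]

-- A's counter loop equals the reference recursion: the visited prefix is already final,
-- the counter j corresponds to dropping the first j names.
theorem pvAFold_eq (names : List String) : ∀ (ws pre : List String) (j : Nat),
    ((PySem.List.enumerate ws (pre.length : Int)).foldl
      (fun (s : List String × Nat) p =>
        if p.2 = "<UNK>" ∧ s.2 < names.length then
          (PySem.List.pySetD s.1 p.1 (names.getD s.2 ""), s.2 + 1)
        else s)
      (pre ++ ws, j)).1
    = pre ++ pvGo ws (names.drop j) := by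
  intro ws
  induction ws with
  | nil => intro pre j; simp [PySem.List.enumerate_nil, pvGo]
  | cons w ws ih =>
    intro pre j
    rw [PySem.List.enumerate_cons]
    by_cases hw : w = "<UNK>"
    · by_cases hj : j < names.length
      · have hc : w = "<UNK>" ∧ j < names.length := ⟨hw, hj⟩
        have hset : PySem.List.pySetD (pre ++ w :: ws) (pre.length : Int) (names.getD j "")
            = (pre ++ [names.getD j ""]) ++ ws := by
          rw [PySem.List.pySetD_natCast]
          rw [List.set_append_right _ _ (Nat.le_refl _)]
          simp
        have hlen : ((pre.length : Int) + 1) = (((pre ++ [names.getD j ""]).length : Int)) := by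
          simp
        simp only [List.foldl_cons, if_pos hc, hset, hlen]
        rw [ih (pre ++ [names.getD j ""]) (j + 1)]
        have hdrop : names.drop j = names.getD j "" :: names.drop (j + 1) := by
          rw [List.drop_eq_getElem_cons hj, List.getD_eq_getElem names "" hj]
        simp [pvGo, hw, hdrop]
      · have hdrop : names.drop j = [] := List.drop_eq_nil_of_le (Nat.le_of_not_lt hj)
        have hlen : ((pre.length : Int) + 1) = (((pre ++ [w]).length : Int)) := by simp
        have hre : pre ++ w :: ws = (pre ++ [w]) ++ ws := by simp
        simp only [List.foldl_cons, if_neg (fun (h : w = "<UNK>" ∧ j < names.length) => hj h.2),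
          hlen, hre]
        rw [ih (pre ++ [w]) j]
        simp [pvGo, hw, hdrop]
    · have hlen : ((pre.length : Int) + 1) = (((pre ++ [w]).length : Int)) := by simp
      have hre : pre ++ w :: ws = (pre ++ [w]) ++ ws := by simp
      simp only [List.foldl_cons, if_neg (fun (h : w = "<UNK>" ∧ j < names.length) => hw h.1),
        hlen, hre]
      rw [ih (pre ++ [w]) j]
      simp [pvGo, hw]

-- ===== VERDICT (by name: the statement is the Claim_ definition above) =====
theorem copy_through_names_py_spec : Claim_equal_copy_through_names_py := by
  intro t pn iw _
  unfold Spec_copy_through_names_py copy_through_names_py copy_through_names_py_alt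
  by_cases h : pn = []
  · simp [h]
  · simp only [if_neg h]
    have hA := pvAFold_eq
      ((PySem.List.sorted (PySem.Dict.ofList pn).keys (fun x => x) false).map
        (fun pos => (PySem.Dict.ofList pn).getD pos ""))
      (PySem.Str.split₀ t) [] 0
    simp only [List.length_nil, Nat.cast_zero, List.nil_append, List.drop_zero] at hA
    rw [hA, pvSegFold_nil, pvFoldl_out]
    simp only [List.nil_append]
    rw [pvInterleave_eq (PySem.Str.split₀ t)
        ((PySem.List.sorted (PySem.Dict.ofList pn).keys (fun x => x) false).map
          (fun pos => (PySem.Dict.ofList pn).getD pos ""))]
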